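-- pv_equiv track=rewrite | github.com/CLARIAH/wp6-missieven | programs/lib.py | distillPlace
-- ===== SOURCE A (Python) =====
-- PLACE_LOWERS = set(
--     """
--     aan
--     boord
--     de
--     eiland
--     het
--     in
--     nabij
--     op
--     rede
--     schip
--     ter
--     van
--     voor
--     zuidpunt
-- """.strip().split()
-- )
--
-- PLACE_VARIANTS = {}
--
-- def distillPlace(source):
--     inWords = source.split()
--     valWords = []
--     outWords = []
--     placeCandidate = []
--     isPlace = False
--
--     for word in inWords:
--         wordL = word.lower()
--         if placeCandidate is None:
--             outWords.append(word)
--         elif wordL in PLACE_VARIANTS: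
--             placeCandidate.append(PLACE_VARIANTS[wordL])
--             isPlace = True
--         elif wordL in PLACE_LOWERS:
--             placeCandidate.append(wordL)
--         else:
--             if placeCandidate:
--                 if isPlace:
--                     valWords.extend(placeCandidate)
--                     placeCandidate = None
--                 else:
--                     outWords.extend(placeCandidate)
--                     placeCandidate = []
--             outWords.append(word)
--
--     if placeCandidate:
--         if isPlace:
--             valWords.extend(placeCandidate)
--         else:
--             outWords.extend(placeCandidate)
--
--     return (" ".join(valWords), " ".join(outWords))
-- ===== SOURCE B (Python) =====
-- PLACE_LOWERS = set(
--     """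
--     aan
--     boord
--     de
--     eiland
--     het
--     in
--     nabij
--     op
--     rede
--     schip
--     ter
--     van
--     voor
--     zuidpunt
-- """.strip().split()
-- )
--
-- PLACE_VARIANTS = {}
--
-- def distillPlace(source):
--     # PLACE_VARIANTS is empty, so no word is ever a "place": valWords stays
--     # empty and each word is emitted lowered iff its lowering is a place word.
--     out = [w.lower() if w.lower() in PLACE_LOWERS else w for w in source.split()]
--     return ("", " ".join(out))
-- ===== Notes on version B (the rewrite author's own statement) =====
-- stated objective: simpler
-- what changed: Replaced the stateful run-accumulator/flush state machine (placeCandidate, isPlace, None-poisoning) with a flat per-word classification: since PLACE_VARIANTS is empty, valWords is always empty and each word is emitted lowered iff its lowercase form is a place word, so B is one comprehension plus a join.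
import Mathlib
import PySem

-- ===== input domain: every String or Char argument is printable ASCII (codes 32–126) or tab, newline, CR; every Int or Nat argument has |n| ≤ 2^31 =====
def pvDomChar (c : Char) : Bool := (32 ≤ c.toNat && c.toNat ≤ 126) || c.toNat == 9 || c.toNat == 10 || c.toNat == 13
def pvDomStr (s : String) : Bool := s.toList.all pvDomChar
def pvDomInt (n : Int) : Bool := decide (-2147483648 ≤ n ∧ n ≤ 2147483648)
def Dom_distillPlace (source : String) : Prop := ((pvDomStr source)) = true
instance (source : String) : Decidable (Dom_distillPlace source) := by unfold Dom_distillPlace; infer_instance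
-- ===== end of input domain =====

-- B replaces A's run-accumulator/flush state machine by a flat per-word rewrite
-- (valid because PLACE_VARIANTS is empty, so valWords is always empty): simpler.

-- ===== PORT A =====
def pvPlaceLowers : PySem.Set String :=
  PySem.Set.ofList ["aan","boord","de","eiland","het","in","nabij","op","rede","schip","ter","van","voor","zuidpunt"]

def pvPlaceVariants : PySem.Dict String String := PySem.Dict.empty

-- state: (valWords, outWords, placeCandidate, isPlace); placeCandidate = none is Python's None
def distillPlaceStep (st : List String × List String × Option (List String) × Bool)
    (word : String) : List String × List String × Option (List String) × Bool :=
  match st with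
  | (valWords, outWords, cand, isPlace) =>
    let wordL := PySem.Str.lower word
    match cand with
    | none => (valWords, outWords ++ [word], none, isPlace)
    | some pc =>
      if (PySem.Dict.get? pvPlaceVariants wordL).isSome then
        -- PLACE_VARIANTS[wordL]; the in-check above guarantees isSome, so getD is exact
        (valWords, outWords, some (pc ++ [(PySem.Dict.get? pvPlaceVariants wordL).getD ""]), true)
      else if PySem.Set.contains pvPlaceLowers wordL then
        (valWords, outWords, some (pc ++ [wordL]), isPlace)
      else
        if pc ≠ [] then
          if isPlace then (valWords ++ pc, outWords ++ [word], none, isPlace)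
          else (valWords, outWords ++ pc ++ [word], some [], isPlace)
        else (valWords, outWords ++ [word], some pc, isPlace)

def distillPlace (source : String) : String × String :=
  match (PySem.Str.split₀ source).foldl distillPlaceStep ([], [], some [], false) with
  | (valWords, outWords, cand, isPlace) =>
    match cand with
    | some pc =>
      if pc ≠ [] then
        if isPlace then (PySem.Str.join " " (valWords ++ pc), PySem.Str.join " " outWords)
        else (PySem.Str.join " " valWords, PySem.Str.join " " (outWords ++ pc))
      else (PySem.Str.join " " valWords, PySem.Str.join " " outWords)
    | none => (PySem.Str.join " " valWords, PySem.Str.join " " outWords)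

-- ===== PORT B =====
-- B's own copy of the PLACE_LOWERS constant (Source B defines it itself)
def pvPlaceLowersB : PySem.Set String :=
  PySem.Set.ofList ["aan","boord","de","eiland","het","in","nabij","op","rede","schip","ter","van","voor","zuidpunt"]

def distillPlace_alt (source : String) : String × String :=
  ("", PySem.Str.join " " ((PySem.Str.split₀ source).map (fun w =>
      let wl := PySem.Str.lower w
      if PySem.Set.contains pvPlaceLowersB wl then wl else w)))

-- ===== PRECONDITION & SPEC =====
def Spec_distillPlace (source : String) (out : String × String) : Prop := out = distillPlace_alt source
instance (source : String) (out : String × String) : Decidable (Spec_distillPlace source out) := by unfold Spec_distillPlace; infer_instance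

-- ===== CLAIM (what is proved, stated in full; the proofs are below) =====
def Claim_equal_distillPlace : Prop := ∀ (source : String), Dom_distillPlace source → Spec_distillPlace source (distillPlace source)

-- ===== LEMMAS AND PROOFS =====

-- B's per-word rewrite
def pvRewrite (w : String) : String :=
  let wl := PySem.Str.lower w
  if PySem.Set.contains pvPlaceLowers wl then wl else w

-- Loop invariant: with empty PLACE_VARIANTS, valWords stays [], isPlace stays false,
-- placeCandidate stays some _, and outWords ++ candidate accumulates the rewritten words.
lemma distillPlace_invariant (ws : List String) : ∀ (out pc : List String),
    ∃ o pc', ws.foldl distillPlaceStep ([], out, some pc, false) = ([], o, some pc', false)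
      ∧ o ++ pc' = out ++ pc ++ ws.map pvRewrite := by
  induction ws with
  | nil => intro out pc; exact ⟨out, pc, rfl, by simp⟩
  | cons w ws ih =>
    intro out pc
    have hvar : (PySem.Dict.get? pvPlaceVariants (PySem.Str.lower w)).isSome = false := by
      simp [pvPlaceVariants, PySem.Dict.get?_empty]
    by_cases hc : PySem.Str.lower w ∈ pvPlaceLowers
    · have hcb : PySem.Set.contains pvPlaceLowers (PySem.Str.lower w) = true :=
        (PySem.Set.contains_iff pvPlaceLowers (PySem.Str.lower w)).mpr hc
      have hstep : distillPlaceStep ([], out, some pc, false) w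
          = ([], out, some (pc ++ [PySem.Str.lower w]), false) := by
        simp [distillPlaceStep, hvar, hcb, hc]
      obtain ⟨o, pc', h1, h2⟩ := ih out (pc ++ [PySem.Str.lower w])
      refine ⟨o, pc', by simpa [List.foldl_cons, hstep] using h1, ?_⟩
      simp [h2, pvRewrite, List.append_assoc]
      exact fun h => absurd hc h
    · have hc' : PySem.Set.contains pvPlaceLowers (PySem.Str.lower w) = false := by
        simpa [PySem.Set.contains_iff] using hc
      have hstep : distillPlaceStep ([], out, some pc, false) w
          = ([], out ++ pc ++ [w], some [], false) := by
        by_cases hpc : pc = []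
        · subst hpc; simp [distillPlaceStep, hvar, hc', hc]
        · simp [distillPlaceStep, hvar, hc', hc, hpc]
      obtain ⟨o, pc', h1, h2⟩ := ih (out ++ pc ++ [w]) []
      refine ⟨o, pc', by simpa [List.foldl_cons, hstep] using h1, ?_⟩
      simp [h2, pvRewrite, List.append_assoc]
      exact fun h => absurd h hc

-- ===== VERDICT (by name: the statement is the Claim_ definition above) =====
lemma pvRewrite_eq : pvRewrite = fun w =>
    if PySem.Set.contains pvPlaceLowersB (PySem.Str.lower w) = true
    then PySem.Str.lower w else w := by
  funext w; simp [pvRewrite, pvPlaceLowersB, pvPlaceLowers]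

theorem distillPlace_spec : Claim_equal_distillPlace := by
  intro source _
  unfold Spec_distillPlace distillPlace distillPlace_alt
  obtain ⟨o, pc', h1, h2⟩ := distillPlace_invariant (PySem.Str.split₀ source) [] []
  rw [h1]
  have hmap : o ++ pc' = (PySem.Str.split₀ source).map pvRewrite := by simpa using h2
  have hjoin : PySem.Str.join " " ([] : List String) = "" := by decide
  by_cases hpc : pc' = []
  · subst hpc
    simp only [List.append_nil] at hmap
    simp only [ne_eq, not_true_eq_false, Bool.false_eq_true, if_false, hmap, pvRewrite_eq, hjoin]
  · simp only [ne_eq, hpc, not_false_eq_true, if_true, Bool.false_eq_true, if_false, hmap,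
      pvRewrite_eq, hjoin]
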